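-- pv_equiv track=rewrite | github.com/jorgeandres-220/Tarea-1-BMC | Tarea#1_BMC.py | subsecuencia
-- ===== SOURCE A (Python) =====
-- def subsecuencia(pSuperSecuencia,pSubSecuencia):
--         if (pSubSecuencia == ""):
--             return True
--         largoSub = len(pSubSecuencia)
--         largoSuper = len(pSuperSecuencia)
--         if (largoSuper >= largoSub ):
--             contWhile = 0
--             while (contWhile < largoSub):
--                 if (pSuperSecuencia.count(pSubSecuencia[contWhile]) !=
--                 pSubSecuencia.count(pSubSecuencia[contWhile])) :
--                     return False
--                 else:
--                     contWhile+=1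
--             return True
--         else:
--             print ("Error")
-- ===== SOURCE B (Python) =====
-- def subsecuencia(pSuperSecuencia, pSubSecuencia):
--     if pSubSecuencia == "":
--         return True
--     if len(pSuperSecuencia) < len(pSubSecuencia):
--         print("Error")
--         return None
--     filtered = sorted(c for c in pSuperSecuencia if c in pSubSecuencia)
--     return filtered == sorted(pSubSecuencia)
-- ===== Notes on version B (the rewrite author's own statement) =====
-- stated objective: faster
-- what changed: Replaces the per-index loop that calls super.count/sub.count for every character of sub by a single sort-based multiset comparison: sort the characters of super that occur in sub and compare with sorted(sub).
import Mathlib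
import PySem

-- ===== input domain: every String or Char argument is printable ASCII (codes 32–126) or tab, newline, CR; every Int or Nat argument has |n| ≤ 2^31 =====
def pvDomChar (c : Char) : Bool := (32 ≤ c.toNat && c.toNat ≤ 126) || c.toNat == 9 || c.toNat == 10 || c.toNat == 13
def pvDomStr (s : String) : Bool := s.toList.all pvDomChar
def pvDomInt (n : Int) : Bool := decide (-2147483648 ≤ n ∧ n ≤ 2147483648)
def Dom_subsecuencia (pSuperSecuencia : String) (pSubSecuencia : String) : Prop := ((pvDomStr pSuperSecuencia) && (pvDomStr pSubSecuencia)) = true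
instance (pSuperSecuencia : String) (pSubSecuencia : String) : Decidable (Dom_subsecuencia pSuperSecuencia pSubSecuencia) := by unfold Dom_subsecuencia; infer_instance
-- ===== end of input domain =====

-- B replaces A's per-index count-comparison loop by a sort-based multiset comparison
-- (sorted chars of super occurring in sub vs sorted sub); same return values (the
-- 'Error' print side effect is kept in B; equivalence proved about return values).


-- ===== PORT A =====
-- the while loop: for contWhile = i, i+1, … < len(sub), compare the two counts of sub[contWhile]
def pvLoopA (sup sub : List Char) (i : Nat) : Bool :=
  if h : i < sub.length then
    if PySem.Chars.count sup [sub[i]] ≠ PySem.Chars.count sub [sub[i]] then false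
    else pvLoopA sup sub (i + 1)
  else true
termination_by sub.length - i

def subsecuencia (pSuperSecuencia : String) (pSubSecuencia : String) : Option Bool :=
  if pSubSecuencia = "" then some true
  else
    let largoSub := PySem.Str.len pSubSecuencia
    let largoSuper := PySem.Str.len pSuperSecuencia
    if largoSuper ≥ largoSub then some (pvLoopA pSuperSecuencia.toList pSubSecuencia.toList 0)
    else none  -- print("Error"); the function falls off the end, returning None

-- ===== PORT B =====
def pvFiltered (sup sub : List Char) : List Char :=
  PySem.List.sorted (sup.filter (fun c => PySem.Chars.isIn [c] sub)) (fun x => x) false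

def subsecuencia_alt (pSuperSecuencia : String) (pSubSecuencia : String) : Option Bool :=
  if pSubSecuencia = "" then some true
  else if PySem.Str.len pSuperSecuencia < PySem.Str.len pSubSecuencia then none  -- print("Error"); return None
  else some (decide (pvFiltered pSuperSecuencia.toList pSubSecuencia.toList
                      = PySem.List.sorted pSubSecuencia.toList (fun x => x) false))

-- ===== PRECONDITION & SPEC =====
def Spec_subsecuencia (pSuperSecuencia : String) (pSubSecuencia : String) (out : Option Bool) : Prop := out = subsecuencia_alt pSuperSecuencia pSubSecuencia
instance (pSuperSecuencia : String) (pSubSecuencia : String) (out : Option Bool) : Decidable (Spec_subsecuencia pSuperSecuencia pSubSecuencia out) := by unfold Spec_subsecuencia; infer_instance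

-- ===== CLAIM (what is proved, stated in full; the proofs are below) =====
def Claim_equal_subsecuencia : Prop := ∀ (pSuperSecuencia : String) (pSubSecuencia : String), Dom_subsecuencia pSuperSecuencia pSubSecuencia → Spec_subsecuencia pSuperSecuencia pSubSecuencia (subsecuencia pSuperSecuencia pSubSecuencia)

-- ===== LEMMAS AND PROOFS =====

-- str.count of a single-character needle is List.count
lemma pv_count_go_singleton (c : Char) : ∀ (fuel : Nat) (l : List Char) (acc : Nat),
    l.length ≤ fuel → PySem.Chars.count.go [c] fuel l acc = acc + l.count c := by
  intro fuel
  induction fuel with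
  | zero => intro l acc h; cases l with
    | nil => simp [PySem.Chars.count.go]
    | cons x t => simp at h
  | succ n ih =>
    intro l acc h
    cases l with
    | nil => simp [PySem.Chars.count.go]
    | cons x t =>
      simp only [PySem.Chars.count.go]
      by_cases hx : c = x
      · subst hx
        simp only [List.isPrefixOf, BEq.rfl, Bool.true_and, if_true]
        rw [List.length_singleton, List.drop_one, List.tail_cons,
          ih t (acc + 1) (by simpa using Nat.lt_succ_iff.mp (by simpa using h)),
          List.count_cons_self]
        omega
      · have : ([c].isPrefixOf (x :: t)) = false := by
          simp [List.isPrefixOf, hx]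
        rw [this]
        simp only [Bool.false_eq_true, if_false]
        rw [ih t acc (by simpa using Nat.lt_succ_iff.mp (by simpa using h))]
        rw [List.count_cons_of_ne (Ne.symm hx)]

lemma pv_chars_count_singleton (l : List Char) (c : Char) :
    PySem.Chars.count l [c] = l.count c := by
  simpa using pv_count_go_singleton c l.length l 0 (le_refl _)

-- 'c in s' for a single character is list membership
lemma pv_isIn_singleton (c : Char) (l : List Char) :
    PySem.Chars.isIn [c] l = true ↔ c ∈ l := by
  rw [PySem.Chars.isIn_iff_infix]
  constructor
  · rintro ⟨p, s, h⟩
    rw [← h]; simp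
  · intro h
    obtain ⟨p, s, h⟩ := List.append_of_mem h
    exact ⟨p, s, by rw [h]; simp⟩

-- A's loop decides count agreement for every character of sub from index i on
lemma pv_loopA_eq (sup sub : List Char) (i : Nat) :
    pvLoopA sup sub i = decide (∀ c ∈ sub.drop i, sup.count c = sub.count c) := by
  fun_induction pvLoopA sup sub i with
  | case1 i h hne =>
    rw [pv_chars_count_singleton, pv_chars_count_singleton] at hne
    have hdrop : sub.drop i = sub[i] :: sub.drop (i + 1) := List.drop_eq_getElem_cons h
    have : ¬ (∀ c ∈ sub.drop i, sup.count c = sub.count c) := by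
      intro hall
      exact hne (hall sub[i] (by rw [hdrop]; exact List.mem_cons_self))
    simp [this]
  | case2 i h hne ih =>
    rw [pv_chars_count_singleton, pv_chars_count_singleton] at hne
    have hdrop : sub.drop i = sub[i] :: sub.drop (i + 1) := List.drop_eq_getElem_cons h
    rw [ih]
    apply decide_eq_decide.mpr
    constructor
    · intro hall c hc
      rw [hdrop] at hc
      rcases List.mem_cons.mp hc with rfl | hc'
      · exact not_ne_iff.mp hne
      · exact hall c hc'
    · intro hall c hc
      exact hall c (by rw [hdrop]; exact List.mem_cons_of_mem _ hc)
  | case3 i h =>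
    have : sub.drop i = [] := List.drop_eq_nil_of_le (by omega)
    simp [this]

-- B's multiset comparison is the same count agreement
lemma pv_filter_perm_iff (sup sub : List Char) :
    (sup.filter (fun c => PySem.Chars.isIn [c] sub)).Perm sub
      ↔ ∀ c ∈ sub, sup.count c = sub.count c := by
  rw [List.perm_iff_count]
  constructor
  · intro hall c hc
    have hfil := List.count_filter (l := sup) (a := c)
      (p := fun x => PySem.Chars.isIn [x] sub) ((pv_isIn_singleton c sub).mpr hc)
    have := hall c
    rwa [hfil] at this
  · intro hall c
    by_cases hc : c ∈ sub
    · have hfil := List.count_filter (l := sup) (a := c)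
        (p := fun x => PySem.Chars.isIn [x] sub) ((pv_isIn_singleton c sub).mpr hc)
      rw [hfil]
      exact hall c hc
    · have h0 : List.count c (List.filter (fun c => PySem.Chars.isIn [c] sub) sup) = 0 := by
        rw [List.count_eq_zero]
        intro hm
        exact hc ((pv_isIn_singleton c sub).mp (List.mem_filter.mp hm).2)
      rw [h0, List.count_eq_zero.mpr hc]

lemma pv_core_eq (sup sub : List Char) :
    pvLoopA sup sub 0
      = decide (pvFiltered sup sub = PySem.List.sorted sub (fun x => x) false) := by
  rw [pv_loopA_eq]
  apply decide_eq_decide.mpr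
  rw [List.drop_zero] at *
  rw [← pv_filter_perm_iff]
  unfold pvFiltered
  constructor
  · intro hperm
    exact PySem.List.sorted_eq_sorted_of_perm _ _ _ (fun a b h => h) hperm
  · intro hsorted
    have h1 := PySem.List.sorted_perm (sup.filter (fun c => PySem.Chars.isIn [c] sub)) (fun x => x) false
    have h2 := PySem.List.sorted_perm sub (fun x => x) false
    exact (h1.symm.trans (hsorted ▸ h2))

-- ===== VERDICT (by name: the statement is the Claim_ definition above) =====
theorem subsecuencia_spec : Claim_equal_subsecuencia := by
  intro sup sub _
  unfold Spec_subsecuencia subsecuencia subsecuencia_alt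
  by_cases h0 : sub = ""
  · simp [h0]
  · simp only [h0, if_false]
    by_cases hlen : PySem.Str.len sup ≥ PySem.Str.len sub
    · rw [if_pos hlen, if_neg (by omega)]
      rw [pv_core_eq]
    · rw [if_neg hlen, if_pos (by omega)]
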